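-- pv_equiv track=rewrite | github.com/PasqualeAuriemma/PyTank | pymenu.py | _count_error_row
-- ===== SOURCE A (Python) =====
-- def _count_error_row(message):
--     result = []
--     num_char_tot = 0
--     temp_row = []
--     for word in message.split(" "):
--         num_char_word = len(word)
--         num_char_word = num_char_word if not temp_row else num_char_word + 1
--         num_char_tot = num_char_tot + num_char_word
--         if num_char_tot < 16:
--             temp_row.append(word)
--         else:
--             mex=" ".join(temp_row)
--             result.append(mex)
--             num_char_tot = num_char_word -1
--             temp_row = []
--             temp_row.append(word)
--     if temp_row:
--         result.append(" ".join(temp_row))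
--     return result
-- ===== SOURCE B (Python) =====
-- def _count_error_row(message):
--     # Lines are contiguous slices of `message` cut at space positions:
--     # since " ".join(message.split(" ")) == message, no word lists or joins are needed.
--     boundaries = [i for i, c in enumerate(message) if c == " "] + [len(message)]
--     result = []
--     start = 0
--     prev = -1  # boundary just before the current line's first word
--     for b in boundaries:
--         if b - start >= 16:
--             result.append(message[start:max(prev, start)])
--             start = prev + 1
--         prev = b
--     result.append(message[start:])
--     return result
-- ===== Notes on version B (the rewrite author's own statement) =====
-- stated objective: alternative
-- what changed: B never builds word lists or joins: it precomputes the positions of the space characters in the original string (re-joining the split words reproduces the string exactly, so every line is a contiguous slice of it) and emits each line as a direct slice of the message, deciding flushes by pure index arithmetic on boundary positions.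
import Mathlib
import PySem

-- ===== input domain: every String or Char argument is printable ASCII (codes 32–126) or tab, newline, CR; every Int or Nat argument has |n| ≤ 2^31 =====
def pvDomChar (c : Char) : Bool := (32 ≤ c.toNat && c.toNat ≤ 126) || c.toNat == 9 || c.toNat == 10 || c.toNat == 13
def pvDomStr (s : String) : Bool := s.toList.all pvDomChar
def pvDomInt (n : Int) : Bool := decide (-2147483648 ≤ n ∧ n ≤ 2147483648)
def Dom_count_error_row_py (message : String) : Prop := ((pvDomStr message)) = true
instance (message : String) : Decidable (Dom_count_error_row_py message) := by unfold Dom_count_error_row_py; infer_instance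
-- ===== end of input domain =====

-- B cuts the original string at space positions (list slices) instead of A's word-list
-- accumulation with a running character counter; objective: alternative (no word lists, no joins).


-- ===== PORT A =====
-- one step of A's loop: state = (result, num_char_tot, temp_row)
def pvStepA (st : List (List Char) × Int × List (List Char)) (word : List Char) :
    List (List Char) × Int × List (List Char) :=
  let numCharWord : Int := word.length
  let numCharWord := if st.2.2.isEmpty then numCharWord else numCharWord + 1
  let numCharTot := st.2.1 + numCharWord
  if numCharTot < 16 then (st.1, numCharTot, st.2.2 ++ [word])
  else (st.1 ++ [PySem.Chars.join [' '] st.2.2], numCharWord - 1, [word])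

def count_error_row_py (message : String) : List String :=
  let st := (PySem.Chars.splitOn message.toList [' ']).foldl pvStepA ([], 0, [])
  (if st.2.2.isEmpty then st.1 else st.1 ++ [PySem.Chars.join [' '] st.2.2]).map String.ofList

-- ===== PORT B =====
-- one step of B's loop over the boundary list: state = (result, start, prev)
def pvStepB (s : List Char) (st : List (List Char) × Int × Int) (b : Int) :
    List (List Char) × Int × Int :=
  if 16 ≤ b - st.2.1 then
    (st.1 ++ [PySem.List.slice s (some st.2.1) (some (max st.2.2 st.2.1))], st.2.2 + 1, b)
  else (st.1, st.2.1, b)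

def count_error_row_py_alt (message : String) : List String :=
  let s := message.toList
  let boundaries : List Int :=
    ((PySem.List.enumerate s).filter (fun p => p.2 == ' ')).map (fun p => p.1) ++ [(s.length : Int)]
  let st := boundaries.foldl (pvStepB s) ([], 0, -1)
  (st.1 ++ [PySem.List.slice s (some st.2.1) none]).map String.ofList

-- ===== PRECONDITION & SPEC =====
def Spec_count_error_row_py (message : String) (out : List String) : Prop := out = count_error_row_py_alt message
instance (message : String) (out : List String) : Decidable (Spec_count_error_row_py message out) := by unfold Spec_count_error_row_py; infer_instance

-- ===== CLAIM (what is proved, stated in full; the proofs are below) =====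
def Claim_equal_count_error_row_py : Prop := ∀ (message : String), Dom_count_error_row_py message → Spec_count_error_row_py message (count_error_row_py message)

-- ===== LEMMAS AND PROOFS =====

-- structural characterization of splitOn on the single-char separator ' '
def pvW : List Char → List (List Char)
  | [] => [[]]
  | c :: rest =>
    if c = ' ' then [] :: pvW rest
    else
      match pvW rest with
      | [] => [[c]]
      | w :: ws => (c :: w) :: ws

lemma pvW_ne_nil (t : List Char) : pvW t ≠ [] := by
  cases t with
  | nil => simp [pvW]
  | cons c rest =>
    simp only [pvW]
    split_ifs
    · simp
    · cases h : pvW rest <;> simp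

lemma pvGo_eq (t : List Char) : ∀ (fuel : Nat) (cur : List Char) (acc : List (List Char)),
    t.length < fuel →
    PySem.Chars.splitOn.go [' '] fuel t cur acc
      = acc.reverse ++ (match pvW t with
          | [] => []
          | w :: ws => (cur.reverse ++ w) :: ws) := by
  induction t with
  | nil =>
    intro fuel cur acc hf
    cases fuel with
    | zero => omega
    | succ f => simp [PySem.Chars.splitOn.go, pvW]
  | cons c rest ih =>
    intro fuel cur acc hf
    cases fuel with
    | zero => omega
    | succ f =>
      by_cases hc : c = ' '
      · subst hc
        have : [' '].isPrefixOf (' ' :: rest) = true := by simp [List.isPrefixOf]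
        rw [show PySem.Chars.splitOn.go [' '] (f+1) (' ' :: rest) cur acc
              = PySem.Chars.splitOn.go [' '] f (List.drop 1 (' ' :: rest)) [] (cur.reverse :: acc) by
            simp [PySem.Chars.splitOn.go, this]]
        rw [show List.drop 1 (' ' :: rest) = rest from rfl]
        rw [ih f [] (cur.reverse :: acc) (by simp at hf ⊢; omega)]
        rcases h : pvW rest with _ | ⟨w, ws⟩
        · exact absurd h (pvW_ne_nil rest)
        · simp [pvW, h]
      · have hpre : [' '].isPrefixOf (c :: rest) = false := by
          simp [List.isPrefixOf]; exact fun h => hc h.symm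
        rw [show PySem.Chars.splitOn.go [' '] (f+1) (c :: rest) cur acc
              = PySem.Chars.splitOn.go [' '] f rest (c :: cur) acc by
            simp [PySem.Chars.splitOn.go, hpre]]
        rw [ih f (c :: cur) acc (by simp at hf ⊢; omega)]
        rcases h : pvW rest with _ | ⟨w, ws⟩
        · exact absurd h (pvW_ne_nil rest)
        · simp [pvW, hc, h]

lemma pvSplitOn_space (t : List Char) : PySem.Chars.splitOn t [' '] = pvW t := by
  rw [show PySem.Chars.splitOn t [' '] = PySem.Chars.splitOn.go [' '] (t.length + 1) t [] [] from rfl]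
  rw [pvGo_eq t (t.length + 1) [] [] (by omega)]
  rcases h : pvW t with _ | ⟨w, ws⟩
  · exact absurd h (pvW_ne_nil t)
  · simp

lemma pvJoin_pvW (t : List Char) : PySem.Chars.join [' '] (pvW t) = t := by
  induction t with
  | nil => simp [pvW, PySem.Chars.join_singleton]
  | cons c rest ih =>
    by_cases hc : c = ' '
    · subst hc
      rcases h : pvW rest with _ | ⟨w, ws⟩
      · exact absurd h (pvW_ne_nil rest)
      · rw [show pvW (' ' :: rest) = [] :: w :: ws by simp [pvW, h]]
        rw [PySem.Chars.join_cons_cons, ← h, ih]; rfl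
    · rcases h : pvW rest with _ | ⟨w, ws⟩
      · exact absurd h (pvW_ne_nil rest)
      · rw [show pvW (c :: rest) = (c :: w) :: ws by simp [pvW, hc, h]]
        cases ws with
        | nil =>
          rw [PySem.Chars.join_singleton]
          have := ih; rw [h, PySem.Chars.join_singleton] at this
          simp [this]
        | cons y ys =>
          rw [PySem.Chars.join_cons_cons]
          have := ih; rw [h, PySem.Chars.join_cons_cons] at this
          simpa using this

lemma pvNospace_pvW (t : List Char) : ∀ w ∈ pvW t, ' ' ∉ w := by
  induction t with
  | nil => simp [pvW]
  | cons c rest ih =>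
    by_cases hc : c = ' '
    · subst hc
      rw [show pvW (' ' :: rest) = [] :: pvW rest by simp [pvW]]
      intro w hw
      rw [List.mem_cons] at hw
      rcases hw with hw | hw
      · simp [hw]
      · exact ih w hw
    · rcases h : pvW rest with _ | ⟨w, ws⟩
      · exact absurd h (pvW_ne_nil rest)
      · rw [show pvW (c :: rest) = (c :: w) :: ws by simp [pvW, hc, h]]
        intro v hv
        rw [List.mem_cons] at hv
        rcases hv with hv | hv
        · subst hv
          have hw := ih w (by rw [h]; simp)
          simp [hw, Ne.symm hc]
        · exact ih v (by rw [h, List.mem_cons]; right; exact hv)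

-- join over an append of nonempty lists of words
lemma pvJoin_append (xs ys : List (List Char)) (hx : xs ≠ []) (hy : ys ≠ []) :
    PySem.Chars.join [' '] (xs ++ ys)
      = PySem.Chars.join [' '] xs ++ ' ' :: PySem.Chars.join [' '] ys := by
  induction xs with
  | nil => exact absurd rfl hx
  | cons a xs ih =>
    cases xs with
    | nil =>
      cases ys with
      | nil => exact absurd rfl hy
      | cons b ys => simp [PySem.Chars.join_cons_cons, PySem.Chars.join_singleton]
    | cons a' xs' =>
      have h1 : (a :: a' :: xs') ++ ys = a :: ((a' :: xs') ++ ys) := rfl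
      rw [h1]
      rcases h2 : (a' :: xs') ++ ys with _ | ⟨b, bs⟩
      · simp at h2
      · rw [PySem.Chars.join_cons_cons [' '] a b bs, ← h2, ih (by simp) ]
        rw [PySem.Chars.join_cons_cons]
        simp

-- space positions via enumerate
def pvSpaces (k : Int) (t : List Char) : List Int :=
  ((PySem.List.enumerate t k).filter (fun p => p.2 == ' ')).map (fun p => p.1)

lemma pvSpaces_nil (k : Int) : pvSpaces k [] = [] := rfl

lemma pvSpaces_cons (k : Int) (c : Char) (t : List Char) :
    pvSpaces k (c :: t) = if c = ' ' then k :: pvSpaces (k+1) t else pvSpaces (k+1) t := by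
  by_cases hc : c = ' ' <;>
    simp [pvSpaces, PySem.List.enumerate, hc]

lemma pvSpaces_append (a b : List Char) : ∀ k : Int,
    pvSpaces k (a ++ b) = pvSpaces k a ++ pvSpaces (k + a.length) b := by
  induction a with
  | nil => intro k; simp [pvSpaces_nil]
  | cons c t ih =>
    intro k
    rw [List.cons_append, pvSpaces_cons, pvSpaces_cons, ih (k+1)]
    split_ifs <;> simp <;> ring_nf

lemma pvSpaces_nospace (w : List Char) (h : ' ' ∉ w) (k : Int) : pvSpaces k w = [] := by
  induction w generalizing k with
  | nil => rfl
  | cons c t ih =>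
    rw [pvSpaces_cons]
    have hc : c ≠ ' ' := fun hc => h (by simp [hc])
    rw [if_neg hc]
    exact ih (fun ht => h (by simp [ht])) (k+1)

-- the boundary list as a function of the word list
def pvBounds (off : Int) : List (List Char) → List Int
  | [] => []
  | w :: ws => (off + w.length) :: pvBounds (off + w.length + 1) ws

lemma pvBounds_char (ws : List (List Char)) : ∀ k : Int, ws ≠ [] → (∀ w ∈ ws, ' ' ∉ w) →
    pvSpaces k (PySem.Chars.join [' '] ws) ++ [k + (PySem.Chars.join [' '] ws).length]
      = pvBounds k ws := by
  induction ws with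
  | nil => intro k h; exact absurd rfl h
  | cons w ws ih =>
    intro k _ hns
    cases ws with
    | nil =>
      rw [PySem.Chars.join_singleton, pvSpaces_nospace w (hns w (by simp)) k]
      simp [pvBounds]
    | cons w' ws' =>
      rw [PySem.Chars.join_cons_cons]
      have h1 : w ++ [' '] ++ PySem.Chars.join [' '] (w' :: ws')
          = w ++ (' ' :: PySem.Chars.join [' '] (w' :: ws')) := by simp
      rw [h1, pvSpaces_append, pvSpaces_nospace w (hns w (by simp)) k, pvSpaces_cons, if_pos rfl]
      have ihh := ih (k + w.length + 1) (by simp) (fun v hv => hns v (by simp [hv]))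
      rw [pvBounds]
      rw [show (pvBounds (k + ↑w.length + 1) (w' :: ws')) = _ from ihh.symm]
      simp
      omega

-- abbreviation: length of the joined current row
def pvL (row : List (List Char)) : Nat := (PySem.Chars.join [' '] row).length

lemma pvL_append_word (row : List (List Char)) (w : List Char) (h : row ≠ []) :
    pvL (row ++ [w]) = pvL row + 1 + w.length := by
  unfold pvL
  rw [pvJoin_append row [w] h (by simp), PySem.Chars.join_singleton]
  simp; omega

-- the finishing steps of the two loops
def pvFinA (st : List (List Char) × Int × List (List Char)) : List (List Char) :=
  if st.2.2.isEmpty then st.1 else st.1 ++ [PySem.Chars.join [' '] st.2.2]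

def pvFinB (s : List Char) (st : List (List Char) × Int × Int) : List (List Char) :=
  st.1 ++ [PySem.List.slice s (some st.2.1) none]

-- MAIN INVARIANT LEMMA: after the first word has been consumed, A's word fold and B's
-- boundary fold stay in lock-step.  startN is the position of the current line's first
-- character in s; A's counter is pvL row, or pvL row - 1 right after A flushed an empty
-- temp_row (then pvL row >= 16 and both sides flush on every later word anyway).
lemma pvMain (s : List Char) (rem : List (List Char)) :
    ∀ (res : List (List Char)) (tot : Int) (row : List (List Char)) (startN : Nat)
      (startI prevI : Int),
    row ≠ [] →
    (tot = (pvL row : Int) ∨ (tot = (pvL row : Int) - 1 ∧ 16 ≤ (pvL row : Int))) →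
    startN ≤ s.length →
    s.drop startN = PySem.Chars.join [' '] (row ++ rem) →
    startI = (startN : Int) →
    prevI = (startN : Int) + (pvL row : Int) →
    pvFinA (rem.foldl pvStepA (res, tot, row))
      = pvFinB s ((pvBounds (prevI + 1) rem).foldl (pvStepB s) (res, startI, prevI)) := by
  induction rem with
  | nil =>
    intro res tot row startN startI prevI hne hinv hle hdrop hsI hpI
    subst hsI hpI
    simp only [List.foldl_nil, pvBounds, pvFinA, pvFinB]
    rw [if_neg (by simpa [List.isEmpty_iff] using hne)]
    rw [PySem.List.slice_from s (by positivity)]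
    simp only [Int.toNat_natCast]
    rw [hdrop]
    simp
  | cons w rest ih =>
    intro res tot row startN startI prevI hne hinv hle hdrop hsI hpI
    subst hsI hpI
    have hL1 : pvL (row ++ [w]) = pvL row + 1 + w.length := pvL_append_word row w hne
    have hLwn : pvL [w] = w.length := by simp [pvL, PySem.Chars.join_singleton]
    -- decompose s beyond the current row
    have hsplit : s.drop startN
        = PySem.Chars.join [' '] row ++ ' ' :: PySem.Chars.join [' '] (w :: rest) := by
      rw [hdrop, pvJoin_append row (w :: rest) hne (by simp)]
    have hlen : s.length - startN
        = pvL row + 1 + (PySem.Chars.join [' '] (w :: rest)).length := by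
      have := congrArg List.length hsplit
      simp at this
      unfold pvL
      omega
    -- A's step on w (row nonempty)
    have hAstep : pvStepA (res, tot, row) w
        = (if tot + ((w.length : Int) + 1) < 16
            then (res, tot + ((w.length : Int) + 1), row ++ [w])
            else (res ++ [PySem.Chars.join [' '] row], (w.length : Int) + 1 - 1, [w])) := by
      simp [pvStepA, (by simpa [List.isEmpty_iff] using hne : row.isEmpty = false)]
    -- B's step on the next boundary (the definition, spelled out)
    have hBstep : ∀ (r : List (List Char)) (a p b : Int), pvStepB s (r, a, p) b
        = (if 16 ≤ b - a
            then (r ++ [PySem.List.slice s (some a) (some (max p a))], p + 1, b)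
            else (r, a, b)) := fun _ _ _ _ => rfl
    -- the flushed slice is the joined row
    have hslice : PySem.List.slice s (some ((startN : Int)))
          (some (max ((startN : Int) + (pvL row : Int)) (startN : Int)))
        = PySem.Chars.join [' '] row := by
      have hmax : max ((startN : Int) + (pvL row : Int)) (startN : Int)
          = ((startN + pvL row : Nat) : Int) := by push_cast; omega
      rw [hmax, PySem.List.slice_natCast s startN (startN + pvL row)]
      rw [show startN + pvL row - startN = pvL row by omega, hsplit]
      simp [pvL]
    rw [show pvBounds ((startN : Int) + (pvL row : Int) + 1) (w :: rest)
          = ((startN : Int) + (pvL row : Int) + 1 + (w.length : Int))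
              :: pvBounds ((startN : Int) + (pvL row : Int) + 1 + (w.length : Int) + 1) rest
        from rfl]
    rw [List.foldl_cons, List.foldl_cons, hAstep, hBstep]
    by_cases hflush : 16 ≤ tot + ((w.length : Int) + 1)
    · -- both sides flush (in the quirk case tot = pvL row - 1 ≥ 15, so B flushes too)
      have hBc : 16 ≤ ((startN : Int) + (pvL row : Int) + 1 + (w.length : Int)) - startN := by
        rcases hinv with h | ⟨h, h16⟩ <;> omega
      rw [if_neg (by omega), if_pos hBc, hslice]
      have hdrop' : s.drop (startN + pvL row + 1) = PySem.Chars.join [' '] ([w] ++ rest) := by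
        have : s.drop (startN + pvL row + 1) = (s.drop startN).drop (pvL row + 1) := by
          rw [List.drop_drop]; ring_nf
        rw [this, hsplit]
        simp [pvL]
      exact ih (res ++ [PySem.Chars.join [' '] row]) ((w.length : Int) + 1 - 1) [w]
          (startN + pvL row + 1) _ _ (by simp)
          (by left; push_cast [hLwn]; ring)
          (by omega) hdrop'
          (by push_cast; ring)
          (by push_cast [hLwn]; ring)
    · -- neither side flushes; in particular tot = pvL row (the quirk case always flushes)
      have htot : tot = (pvL row : Int) := by
        rcases hinv with h | ⟨h, h16⟩
        · exact h
        · omega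
      rw [if_pos (by omega), if_neg (by omega)]
      have hdrop' : s.drop startN = PySem.Chars.join [' '] ((row ++ [w]) ++ rest) := by
        rw [hdrop]; simp
      exact ih res (tot + ((w.length : Int) + 1)) (row ++ [w]) startN _ _ (by simp)
          (by left; rw [htot]; push_cast [hL1]; ring)
          hle hdrop'
          rfl
          (by push_cast [hL1]; ring)

-- ===== VERDICT (by name: the statement is the Claim_ definition above) =====
theorem count_error_row_py_spec : Claim_equal_count_error_row_py := by
  intro message _
  unfold Spec_count_error_row_py count_error_row_py count_error_row_py_alt
  dsimp only
  set s := message.toList with hs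
  rw [pvSplitOn_space s]
  have hjoin : PySem.Chars.join [' '] (pvW s) = s := pvJoin_pvW s
  have hns : ∀ w ∈ pvW s, ' ' ∉ w := pvNospace_pvW s
  -- the boundary list of the port is pvBounds 0 (pvW s)
  have hbounds : ((PySem.List.enumerate s).filter (fun p => p.2 == ' ')).map (fun p => p.1)
        ++ [(s.length : Int)] = pvBounds 0 (pvW s) := by
    have := pvBounds_char (pvW s) 0 (pvW_ne_nil s) hns
    rw [hjoin] at this
    simpa [pvSpaces] using this
  rw [hbounds]
  rcases hW : pvW s with _ | ⟨w, rest⟩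
  · exact absurd hW (pvW_ne_nil s)
  · -- peel the first word/boundary by hand, then apply the invariant lemma
    have hdrop0 : s.drop 0 = PySem.Chars.join [' '] ([w] ++ rest) := by
      rw [List.drop_zero, ← hjoin, hW]; rfl
    have hLwn : pvL [w] = w.length := by simp [pvL, PySem.Chars.join_singleton]
    have hA1 : pvStepA (([] : List (List Char)), 0, ([] : List (List Char))) w
        = (if (0 : Int) + (w.length : Int) < 16
            then (([] : List (List Char)), (0 : Int) + (w.length : Int), [w])
            else ([PySem.Chars.join [' '] ([] : List (List Char))],
                  (w.length : Int) - 1, [w])) := by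
      simp only [pvStepA, List.isEmpty_nil, if_pos rfl, List.nil_append]
      split_ifs <;> rfl
    have hB1 : ∀ b : Int, pvStepB s (([] : List (List Char)), 0, -1) b
        = (if 16 ≤ b - 0
            then ([PySem.List.slice s (some (0 : Int)) (some (max (-1 : Int) 0))],
                  (-1 : Int) + 1, b)
            else (([] : List (List Char)), (0 : Int), b)) := fun _ => rfl
    have hslice0 : PySem.List.slice s (some (0 : Int)) (some (max (-1 : Int) 0)) = [] := by
      rw [show (max (-1 : Int) 0) = ((0 : Nat) : Int) by omega,
          show ((0 : Int)) = ((0 : Nat) : Int) from rfl]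
      rw [PySem.List.slice_natCast]
      simp
    rw [show pvBounds 0 (w :: rest)
          = ((0 : Int) + (w.length : Int))
              :: pvBounds ((0 : Int) + (w.length : Int) + 1) rest from rfl]
    rw [List.foldl_cons, List.foldl_cons, hA1, hB1]
    by_cases hf : (0 : Int) + (w.length : Int) < 16
    · rw [if_pos hf, if_neg (show ¬ (16 ≤ (0 : Int) + (w.length : Int) - 0) by omega)]
      have hfin := pvMain s rest [] ((0 : Int) + (w.length : Int)) [w] 0
          ((0 : Int)) ((0 : Int) + (w.length : Int)) (by simp)
          (Or.inl (by simp [hLwn])) (by omega) hdrop0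
          (by simp) (by simp [hLwn])
      exact congrArg (List.map String.ofList) hfin
    · rw [if_neg hf, if_pos (show 16 ≤ (0 : Int) + (w.length : Int) - 0 by omega), hslice0]
      have hfin := pvMain s rest [PySem.Chars.join [' '] ([] : List (List Char))]
          ((w.length : Int) - 1) [w] 0 ((-1 : Int) + 1) ((0 : Int) + (w.length : Int))
          (by simp)
          (Or.inr ⟨by simp [hLwn], by simp [hLwn]; omega⟩)
          (by omega) hdrop0
          (by omega) (by simp [hLwn])
      rw [show PySem.Chars.join [' '] ([] : List (List Char)) = [] from rfl] at hfin
      exact congrArg (List.map String.ofList) hfin
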